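-- pv_equiv track=rewrite | github.com/pepeL95/repoff | backend/src/repoff/orchestration/middlewares/evidence_memory.py | _render_memory_block
-- ===== SOURCE A (Python) =====
-- from typing import Any, Annotated, cast
--
-- WORKING_MEMORY_HEADER = "Working memory from tool results. Reuse this before reopening the same source:"
--
-- FAILURE_MEMORY_HEADER = "Recent failed attempts. Do not give up or repeat them blindly; use them to choose a better next move:"
--
-- def _render_memory_block(evidence_memory: list[dict[str, Any]]) -> str | None:
--     if not evidence_memory:
--         return None
--     success_lines = [WORKING_MEMORY_HEADER]
--     failure_lines = [FAILURE_MEMORY_HEADER]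
--     for item in evidence_memory:
--         tool_name = str(item.get("tool", "")).strip() or "tool"
--         source_path = str(item.get("source_path", "")).strip()
--         summary = str(item.get("summary", "")).strip()
--         status = str(item.get("status", "success")).strip() or "success"
--         if not summary:
--             continue
--         target_lines = success_lines if status == "success" else failure_lines
--         if source_path:
--             target_lines.append(f"- {tool_name} on {source_path}: {summary}")
--         else:
--             target_lines.append(f"- {tool_name}: {summary}")
--     lines: list[str] = []
--     if len(success_lines) > 1:
--         lines.extend(success_lines)
--     if len(failure_lines) > 1:
--         if lines:
--             lines.append("")
--         lines.extend(failure_lines)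
--     if not lines:
--         return None
--     return "\n".join(lines)
-- ===== SOURCE B (Python) =====
-- WORKING_MEMORY_HEADER = "Working memory from tool results. Reuse this before reopening the same source:"
--
-- FAILURE_MEMORY_HEADER = "Recent failed attempts. Do not give up or repeat them blindly; use them to choose a better next move:"
--
--
-- def _format_line(item):
--     summary = str(item.get("summary", "")).strip()
--     if not summary:
--         return None
--     tool_name = str(item.get("tool", "")).strip() or "tool"
--     source_path = str(item.get("source_path", "")).strip()
--     if source_path:
--         return f"- {tool_name} on {source_path}: {summary}"
--     return f"- {tool_name}: {summary}"
--
--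
-- def _is_success(item):
--     return (str(item.get("status", "success")).strip() or "success") == "success"
--
--
-- def _render_memory_block(evidence_memory):
--     success = [line for item in evidence_memory
--                if _is_success(item) and (line := _format_line(item)) is not None]
--     failure = [line for item in evidence_memory
--                if not _is_success(item) and (line := _format_line(item)) is not None]
--     blocks = []
--     if success:
--         blocks.append("\n".join([WORKING_MEMORY_HEADER] + success))
--     if failure:
--         blocks.append("\n".join([FAILURE_MEMORY_HEADER] + failure))
--     return "\n\n".join(blocks) if blocks else None
-- ===== Notes on version B (the rewrite author's own statement) =====
-- stated objective: simpler
-- what changed: Replaces A's single pass that mutates two branch-selected accumulator lists and then splices them by length checks with two independent declarative passes (a shared formatter plus a status predicate) whose blocks are joined with '\n\n' only when both are non-empty.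
import Mathlib
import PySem

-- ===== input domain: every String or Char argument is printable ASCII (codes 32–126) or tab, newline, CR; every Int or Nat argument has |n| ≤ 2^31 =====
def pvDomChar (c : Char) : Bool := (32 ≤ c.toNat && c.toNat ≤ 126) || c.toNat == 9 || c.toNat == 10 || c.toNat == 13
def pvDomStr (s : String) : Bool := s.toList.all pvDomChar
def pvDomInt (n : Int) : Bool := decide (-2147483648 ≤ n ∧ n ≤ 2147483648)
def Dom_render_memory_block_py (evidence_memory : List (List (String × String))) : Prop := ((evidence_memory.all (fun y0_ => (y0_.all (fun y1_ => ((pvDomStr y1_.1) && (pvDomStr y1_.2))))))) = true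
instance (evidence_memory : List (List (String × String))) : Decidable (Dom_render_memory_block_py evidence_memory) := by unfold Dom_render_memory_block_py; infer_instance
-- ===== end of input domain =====

-- B builds the success/failure blocks in two independent declarative passes instead of A's
-- one mutating branch-selecting pass; same output, stated objective: simpler.

-- shared helper (used by both ports): Python's item.get(k, d) on the association list (first match)
def pvItemGet (item : List (String × String)) (k d : String) : String :=
  match item.find? (fun p => p.1 == k) with
  | some p => p.2
  | none => d

def WORKING_MEMORY_HEADER : String := "Working memory from tool results. Reuse this before reopening the same source:"
def FAILURE_MEMORY_HEADER : String := "Recent failed attempts. Do not give up or repeat them blindly; use them to choose a better next move:"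

-- ===== PORT A =====
-- loop body of A's for-loop, named so the fold lemma below can talk about it
def pvStepA (acc : List String × List String) (item : List (String × String)) : List String × List String :=
  let tool_name := let t := PySem.Str.strip (pvItemGet item "tool" ""); if t = "" then "tool" else t
  let source_path := PySem.Str.strip (pvItemGet item "source_path" "")
  let summary := PySem.Str.strip (pvItemGet item "summary" "")
  let status := let s := PySem.Str.strip (pvItemGet item "status" "success"); if s = "" then "success" else s
  if summary = "" then acc
  else
    let line := if source_path = "" then "- " ++ tool_name ++ ": " ++ summary
                else "- " ++ tool_name ++ " on " ++ source_path ++ ": " ++ summary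
    if status = "success" then (acc.1 ++ [line], acc.2) else (acc.1, acc.2 ++ [line])

def render_memory_block_py (evidence_memory : List (List (String × String))) : Option String :=
  if evidence_memory = [] then none
  else
    let acc := evidence_memory.foldl pvStepA ([WORKING_MEMORY_HEADER], [FAILURE_MEMORY_HEADER])
    let lines : List String := []
    let lines := if acc.1.length > 1 then lines ++ acc.1 else lines
    let lines := if acc.2.length > 1 then (if lines ≠ [] then lines ++ [""] else lines) ++ acc.2 else lines
    if lines = [] then none
    else some (PySem.Str.join "\n" lines)

-- ===== PORT B =====
def pvFormatLine (item : List (String × String)) : Option String :=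
  let summary := PySem.Str.strip (pvItemGet item "summary" "")
  if summary = "" then none
  else
    let tool_name := let t := PySem.Str.strip (pvItemGet item "tool" ""); if t = "" then "tool" else t
    let source_path := PySem.Str.strip (pvItemGet item "source_path" "")
    if source_path = "" then some ("- " ++ tool_name ++ ": " ++ summary)
    else some ("- " ++ tool_name ++ " on " ++ source_path ++ ": " ++ summary)

def pvIsSuccess (item : List (String × String)) : Bool :=
  (let s := PySem.Str.strip (pvItemGet item "status" "success"); if s = "" then "success" else s) == "success"

def render_memory_block_py_alt (evidence_memory : List (List (String × String))) : Option String :=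
  let success := evidence_memory.filterMap (fun item => if pvIsSuccess item then pvFormatLine item else none)
  let failure := evidence_memory.filterMap (fun item => if !pvIsSuccess item then pvFormatLine item else none)
  let blocks := (if success = [] then [] else [PySem.Str.join "\n" (WORKING_MEMORY_HEADER :: success)])
             ++ (if failure = [] then [] else [PySem.Str.join "\n" (FAILURE_MEMORY_HEADER :: failure)])
  if blocks = [] then none
  else some (PySem.Str.join "\n\n" blocks)

-- ===== PRECONDITION & SPEC =====
def Spec_render_memory_block_py (evidence_memory : List (List (String × String))) (out : Option String) : Prop := out = render_memory_block_py_alt evidence_memory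
instance (evidence_memory : List (List (String × String))) (out : Option String) : Decidable (Spec_render_memory_block_py evidence_memory out) := by unfold Spec_render_memory_block_py; infer_instance

-- ===== CLAIM (what is proved, stated in full; the proofs are below) =====
def Claim_equal_render_memory_block_py : Prop := ∀ (evidence_memory : List (List (String × String))), Dom_render_memory_block_py evidence_memory → Spec_render_memory_block_py evidence_memory (render_memory_block_py evidence_memory)

-- ===== LEMMAS AND PROOFS =====

theorem step_pair (p : List String × List String) (item : List (String × String)) :
    pvStepA p item
    = (p.1 ++ (if pvIsSuccess item then pvFormatLine item else none).toList,
       p.2 ++ (if !pvIsSuccess item then pvFormatLine item else none).toList) := by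
  unfold pvStepA pvFormatLine pvIsSuccess
  by_cases hsum : PySem.Str.strip (pvItemGet item "summary" "") = ""
  · simp [hsum]
  · by_cases hst : (if PySem.Str.strip (pvItemGet item "status" "success") = ""
                    then "success" else PySem.Str.strip (pvItemGet item "status" "success")) = "success"
    · rw [if_neg hsum]
      simp only [hst, if_neg hsum]
      simp only [Option.toList]
      split_ifs <;> simp_all
    · rw [if_neg hsum]
      simp only [if_neg hst, if_neg hsum]
      have : ((if PySem.Str.strip (pvItemGet item "status" "success") = ""
                then "success" else PySem.Str.strip (pvItemGet item "status" "success")) == "success") = false := by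
        simp [hst]
      simp only [this, Bool.not_false, if_true, Option.toList]
      split_ifs <;> simp_all

theorem toList_filterMap {α β : Type} (f : α → Option β) (a : α) (l : List α) :
    (f a).toList ++ l.filterMap f = (a :: l).filterMap f := by
  rw [List.filterMap_cons]; cases f a <;> simp

theorem fold_eq (em : List (List (String × String))) : ∀ (p : List String × List String),
    em.foldl pvStepA p
    = (p.1 ++ em.filterMap (fun item => if pvIsSuccess item then pvFormatLine item else none),
       p.2 ++ em.filterMap (fun item => if !pvIsSuccess item then pvFormatLine item else none)) := by
  induction em with
  | nil => simp
  | cons item rest ih =>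
    intro p
    rw [List.foldl_cons, ih, step_pair, ← toList_filterMap, ← toList_filterMap]
    simp

theorem charsJoin_append (sep : List Char) (xs ys : List (List Char)) (hx : xs ≠ []) (hy : ys ≠ []) :
    PySem.Chars.join sep (xs ++ ys) = PySem.Chars.join sep xs ++ sep ++ PySem.Chars.join sep ys := by
  induction xs with
  | nil => exact absurd rfl hx
  | cons a xs ih =>
    cases xs with
    | nil =>
      cases ys with
      | nil => exact absurd rfl hy
      | cons b ys => simp [PySem.Chars.join_cons_cons, PySem.Chars.join_singleton]
    | cons c xs' =>
      have h := ih (by simp)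
      simp only [List.cons_append, PySem.Chars.join_cons_cons] at *
      simp [h, List.append_assoc]

theorem strJoin_singleton (sep : String) (x : String) : PySem.Str.join sep [x] = x := by
  simp [PySem.Str.join, PySem.Chars.join_singleton]

theorem strJoin_blocks (xs ys : List String) (hx : xs ≠ []) (hy : ys ≠ []) :
    PySem.Str.join "\n" (xs ++ [""] ++ ys) = PySem.Str.join "\n\n" [PySem.Str.join "\n" xs, PySem.Str.join "\n" ys] := by
  have hx' : xs.map String.toList ≠ [] := by simpa using hx
  have hy' : ys.map String.toList ≠ [] := by simpa using hy
  simp only [PySem.Str.join, List.map_append, List.map_cons, List.map_nil]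
  rw [charsJoin_append _ _ _ (by simp [hx']) hy', charsJoin_append _ _ _ hx' (by simp)]
  simp [PySem.Chars.join_singleton, PySem.Chars.join_cons_cons,
    String.toList_ofList, List.append_assoc]

-- ===== VERDICT (by name: the statement is the Claim_ definition above) =====
theorem render_memory_block_py_spec : Claim_equal_render_memory_block_py := by
  intro em _
  unfold Spec_render_memory_block_py render_memory_block_py render_memory_block_py_alt
  cases em with
  | nil => simp
  | cons e rest =>
    simp only [reduceCtorEq, if_neg, not_false_eq_true]
    rw [fold_eq]
    set S := (e :: rest).filterMap (fun item => if pvIsSuccess item then pvFormatLine item else none) with hS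
    set F := (e :: rest).filterMap (fun item => if !pvIsSuccess item then pvFormatLine item else none) with hF
    by_cases hs : S = [] <;> by_cases hf : F = []
    · simp [hs, hf]
    · simp [hs, hf, strJoin_singleton, List.length_pos_iff]
    · simp [hs, hf, strJoin_singleton, List.length_pos_iff]
    · have hWlen : ([WORKING_MEMORY_HEADER] ++ S).length > 1 := by
        simp [List.length_pos_iff, hs]
      have hFlen : ([FAILURE_MEMORY_HEADER] ++ F).length > 1 := by
        simp [List.length_pos_iff, hf]
      simp only [hs, hf, List.nil_append, if_pos hWlen, if_pos hFlen, ne_eq]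
      rw [if_pos (show ¬([WORKING_MEMORY_HEADER] ++ S) = [] by simp)]
      rw [if_neg (show ¬(([WORKING_MEMORY_HEADER] ++ S) ++ [""] ++ ([FAILURE_MEMORY_HEADER] ++ F)) = [] by simp)]
      rw [strJoin_blocks ([WORKING_MEMORY_HEADER] ++ S) ([FAILURE_MEMORY_HEADER] ++ F) (by simp) (by simp)]
      simp
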